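-- pv_equiv track=rewrite | github.com/Ostvroom/alpha | trackers/nft_pnl.py | _moralis_single_trade_extremes
-- ===== SOURCE A (Python) =====
-- from typing import Any, Dict, List, Optional, Tuple
--
-- def _moralis_single_trade_extremes(wallet_lower: str, trades: List[dict]) -> Tuple[Optional[int], Optional[int]]:
--     """Largest one-row price when wallet is seller (best sale) vs buyer (largest buy). Prices in wei."""
--     max_sell: Optional[int] = None
--     max_buy: Optional[int] = None
--     for row in trades:
--         buyer = (row.get("buyer_address") or "").lower()
--         seller = (row.get("seller_address") or "").lower()
--         try:
--             price = int(row.get("price") or 0)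
--         except (TypeError, ValueError):
--             price = 0
--         if price <= 0:
--             continue
--         if seller == wallet_lower:
--             max_sell = price if max_sell is None else max(max_sell, price)
--         if buyer == wallet_lower:
--             max_buy = price if max_buy is None else max(max_buy, price)
--     return max_sell, max_buy
-- ===== SOURCE B (Python) =====
-- def _moralis_single_trade_extremes(wallet_lower, trades):
--     """Divide and conquer: per-row (sell, buy) extremes, merged pairwise with an
--     optional-max combine over the two halves of the list."""
--     def _row_extremes(row):
--         buyer = (row.get("buyer_address") or "").lower()
--         seller = (row.get("seller_address") or "").lower()
--         try:
--             price = int(row.get("price") or 0)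
--         except (TypeError, ValueError):
--             price = 0
--         if price <= 0:
--             return (None, None)
--         return (price if seller == wallet_lower else None,
--                 price if buyer == wallet_lower else None)
--
--     def _omax(a, b):
--         if a is None:
--             return b
--         if b is None:
--             return a
--         return a if a > b else b
--
--     def _solve(rows):
--         if not rows:
--             return (None, None)
--         if len(rows) == 1:
--             return _row_extremes(rows[0])
--         k = len(rows) // 2
--         left = _solve(rows[:k])
--         right = _solve(rows[k:])
--         return (_omax(left[0], right[0]), _omax(left[1], right[1]))
--
--     return _solve(trades)
-- ===== Notes on version B (the rewrite author's own statement) =====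
-- stated objective: alternative
-- what changed: B is a divide-and-conquer recursion: each row is mapped to its own (sell, buy) optional extremes and results of the two halves are merged with a pointwise optional-max combine, instead of A's single left-to-right loop with running maxima; correct because max is associative and commutative.
import Mathlib
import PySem

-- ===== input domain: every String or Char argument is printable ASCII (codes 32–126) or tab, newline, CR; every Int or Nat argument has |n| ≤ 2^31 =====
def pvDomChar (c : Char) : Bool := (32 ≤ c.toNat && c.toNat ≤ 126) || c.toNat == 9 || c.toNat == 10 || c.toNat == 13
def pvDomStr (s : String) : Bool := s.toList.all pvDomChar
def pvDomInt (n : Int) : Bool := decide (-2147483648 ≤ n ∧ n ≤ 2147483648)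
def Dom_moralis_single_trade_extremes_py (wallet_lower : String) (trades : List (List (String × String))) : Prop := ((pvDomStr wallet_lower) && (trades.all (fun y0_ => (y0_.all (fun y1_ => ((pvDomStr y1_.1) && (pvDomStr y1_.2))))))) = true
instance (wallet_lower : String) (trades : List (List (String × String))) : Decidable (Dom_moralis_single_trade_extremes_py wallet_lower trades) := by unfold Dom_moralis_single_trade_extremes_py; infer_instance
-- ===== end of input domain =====

-- B replaces A's single loop with running maxima by a divide-and-conquer merge of
-- per-row optional extremes; same value proved, no speed claim.

-- shared row parsing (the identical parsing lines of both Pythons):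
-- buyer/seller = (row.get(k) or "").lower(); price = int(row.get("price") or 0) with
-- ValueError → 0 ('' is falsy → 0; a TypeError cannot arise for string values).
def pvRowBuyer (row : List (String × String)) : String :=
  PySem.Str.lower (((PySem.Dict.mk row).get? "buyer_address").getD "")

def pvRowSeller (row : List (String × String)) : String :=
  PySem.Str.lower (((PySem.Dict.mk row).get? "seller_address").getD "")

def pvRowPrice (row : List (String × String)) : Int :=
  match (PySem.Dict.mk row).get? "price" with
  | none => 0
  | some s => if s = "" then 0 else (PySem.Int.ofStr? s).getD 0

-- ===== PORT A =====
-- running Optional maxima updated inside the loop, as in A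
def moralis_single_trade_extremes_py (wallet_lower : String) (trades : List (List (String × String))) : Option Int × Option Int :=
  trades.foldl (fun (st : Option Int × Option Int) row =>
    let price := pvRowPrice row
    if price ≤ 0 then st
    else
      let max_sell := if pvRowSeller row = wallet_lower then
          some (match st.1 with | none => price | some m => max m price) else st.1
      let max_buy := if pvRowBuyer row = wallet_lower then
          some (match st.2 with | none => price | some m => max m price) else st.2
      (max_sell, max_buy)) (none, none)

-- ===== PORT B =====
-- B's _row_extremes: a single row's (sell, buy) optional extremes
def pvRowExt (wallet_lower : String) (row : List (String × String)) : Option Int × Option Int :=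
  let price := pvRowPrice row
  if price ≤ 0 then (none, none)
  else ((if pvRowSeller row = wallet_lower then some price else none),
        (if pvRowBuyer row = wallet_lower then some price else none))

-- B's _omax: optional max (None is absent)
def pvOmax (a b : Option Int) : Option Int :=
  match a, b with
  | none, b => b
  | a, none => a
  | some x, some y => if x > y then some x else some y

-- B's _solve: divide and conquer over the row list
def pvSolve (wallet_lower : String) (rows : List (List (String × String))) : Option Int × Option Int :=
  match rows with
  | [] => (none, none)
  | [r] => pvRowExt wallet_lower r
  | r1 :: r2 :: rest =>
    let l := r1 :: r2 :: rest
    let k := l.length / 2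
    let left := pvSolve wallet_lower (l.take k)
    let right := pvSolve wallet_lower (l.drop k)
    (pvOmax left.1 right.1, pvOmax left.2 right.2)
termination_by rows.length
decreasing_by
  · simp [List.length_take]; omega
  · simp; omega

def moralis_single_trade_extremes_py_alt (wallet_lower : String) (trades : List (List (String × String))) : Option Int × Option Int :=
  pvSolve wallet_lower trades

-- ===== PRECONDITION & SPEC =====
def Spec_moralis_single_trade_extremes_py (wallet_lower : String) (trades : List (List (String × String))) (out : Option Int × Option Int) : Prop := out = moralis_single_trade_extremes_py_alt wallet_lower trades
instance (wallet_lower : String) (trades : List (List (String × String))) (out : Option Int × Option Int) : Decidable (Spec_moralis_single_trade_extremes_py wallet_lower trades out) := by unfold Spec_moralis_single_trade_extremes_py; infer_instance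

-- ===== CLAIM (what is proved, stated in full; the proofs are below) =====
def Claim_equal_moralis_single_trade_extremes_py : Prop := ∀ (wallet_lower : String) (trades : List (List (String × String))), Dom_moralis_single_trade_extremes_py wallet_lower trades → Spec_moralis_single_trade_extremes_py wallet_lower trades (moralis_single_trade_extremes_py wallet_lower trades)

-- ===== LEMMAS AND PROOFS =====

@[simp] theorem pvOmax_none_left (b : Option Int) : pvOmax none b = b := rfl
@[simp] theorem pvOmax_none_right (a : Option Int) : pvOmax a none = a := by cases a <;> rfl

theorem pvOmax_some_some (x y : Int) : pvOmax (some x) (some y) = some (max x y) := by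
  simp only [pvOmax, max_def]
  split_ifs <;> simp <;> omega

theorem pvOmax_assoc (a b c : Option Int) : pvOmax (pvOmax a b) c = pvOmax a (pvOmax b c) := by
  cases a <;> cases b <;> cases c <;> simp [pvOmax_some_some, max_assoc]

-- the valid sale / buy prices of the trade list, in order
def pvSells (w : String) (ts : List (List (String × String))) : List Int :=
  ts.flatMap (fun row => if pvRowPrice row ≤ 0 then []
    else if pvRowSeller row = w then [pvRowPrice row] else [])

def pvBuys (w : String) (ts : List (List (String × String))) : List Int :=
  ts.flatMap (fun row => if pvRowPrice row ≤ 0 then []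
    else if pvRowBuyer row = w then [pvRowPrice row] else [])

-- A's running maximum as a fold
def pvRunMax (o : Option Int) (l : List Int) : Option Int :=
  l.foldl (fun o p => some (match o with | none => p | some m => max m p)) o

-- folded optional max of a price list (right fold)
def pvGmax (l : List Int) : Option Int :=
  l.foldr (fun p o => pvOmax (some p) o) none

-- the foldr that B's divide and conquer computes
def pvF (w : String) (ts : List (List (String × String))) : Option Int × Option Int :=
  ts.foldr (fun r acc => (pvOmax (pvRowExt w r).1 acc.1, pvOmax (pvRowExt w r).2 acc.2)) (none, none)

theorem pvA_eq (w : String) (ts : List (List (String × String))) :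
    ∀ s b : Option Int,
      ts.foldl (fun (st : Option Int × Option Int) row =>
        let price := pvRowPrice row
        if price ≤ 0 then st
        else
          let max_sell := if pvRowSeller row = w then
              some (match st.1 with | none => price | some m => max m price) else st.1
          let max_buy := if pvRowBuyer row = w then
              some (match st.2 with | none => price | some m => max m price) else st.2
          (max_sell, max_buy)) (s, b)
      = (pvRunMax s (pvSells w ts), pvRunMax b (pvBuys w ts)) := by
  induction ts with
  | nil => intro s b; simp [pvSells, pvBuys, pvRunMax]
  | cons row rest ih =>
    intro s b
    simp only [List.foldl_cons, pvSells, pvBuys, List.flatMap_cons]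
    rw [show (rest.flatMap _ : List Int) = pvSells w rest from rfl,
        show (rest.flatMap _ : List Int) = pvBuys w rest from rfl]
    by_cases hp : pvRowPrice row ≤ 0
    · simp [hp, ih s b]
    · by_cases hs : pvRowSeller row = w <;> by_cases hb : pvRowBuyer row = w <;>
        simp [hp, hs, hb, ih, pvRunMax]

theorem pvStep_eq (o : Option Int) (p : Int) :
    some (match o with | none => p | some m => max m p) = pvOmax o (some p) := by
  cases o with
  | none => rfl
  | some m => rw [pvOmax_some_some]

@[simp] theorem pvGmax_cons (p : Int) (l : List Int) :
    pvGmax (p :: l) = pvOmax (some p) (pvGmax l) := rfl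

theorem pvRunMax_eq (l : List Int) : ∀ o : Option Int, pvRunMax o l = pvOmax o (pvGmax l) := by
  induction l with
  | nil => intro o; simp [pvRunMax, pvGmax]
  | cons x t ih =>
    intro o
    have h1 : pvRunMax o (x :: t) = pvRunMax (pvOmax o (some x)) t := by
      simp [pvRunMax, pvStep_eq]
    rw [h1, ih, pvOmax_assoc]
    rfl

theorem pvF_eq (w : String) (ts : List (List (String × String))) :
    pvF w ts = (pvGmax (pvSells w ts), pvGmax (pvBuys w ts)) := by
  induction ts with
  | nil => rfl
  | cons row rest ih =>
    have hS : pvSells w (row :: rest) = (if pvRowPrice row ≤ 0 then [] else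
        if pvRowSeller row = w then [pvRowPrice row] else []) ++ pvSells w rest := by
      simp [pvSells]
    have hB : pvBuys w (row :: rest) = (if pvRowPrice row ≤ 0 then [] else
        if pvRowBuyer row = w then [pvRowPrice row] else []) ++ pvBuys w rest := by
      simp [pvBuys]
    have h0 : pvF w (row :: rest) =
        (pvOmax (pvRowExt w row).1 (pvF w rest).1, pvOmax (pvRowExt w row).2 (pvF w rest).2) := rfl
    rw [h0, ih, hS, hB]
    by_cases hp : pvRowPrice row ≤ 0
    · simp [hp, pvRowExt]
    · by_cases hs : pvRowSeller row = w <;> by_cases hb : pvRowBuyer row = w <;>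
        simp [hp, hs, hb, pvRowExt]

theorem pvF_append (w : String) (l1 l2 : List (List (String × String))) :
    pvF w (l1 ++ l2) = (pvOmax (pvF w l1).1 (pvF w l2).1, pvOmax (pvF w l1).2 (pvF w l2).2) := by
  induction l1 with
  | nil => simp [pvF]
  | cons r t ih =>
    simp only [List.cons_append, pvF, List.foldr_cons] at ih ⊢
    rw [ih, pvOmax_assoc, pvOmax_assoc]

theorem pvSolve_eq (w : String) (rows : List (List (String × String))) :
    pvSolve w rows = pvF w rows := by
  fun_induction pvSolve w rows with
  | case1 => rfl
  | case2 r => simp [pvF, pvRowExt]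
  | case3 r1 r2 rest l k left right ihl ihr =>
    have e : (pvOmax left.1 right.1, pvOmax left.2 right.2)
        = (pvOmax (pvF w (l.take k)).1 (pvF w (l.drop k)).1,
           pvOmax (pvF w (l.take k)).2 (pvF w (l.drop k)).2) := by
      rw [show left = pvSolve w (l.take k) from rfl,
          show right = pvSolve w (l.drop k) from rfl, ihl, ihr]
    rw [e]
    have h := pvF_append w (l.take k) (l.drop k)
    rw [List.take_append_drop] at h
    exact h.symm

-- ===== VERDICT (by name: the statement is the Claim_ definition above) =====
theorem moralis_single_trade_extremes_py_spec : Claim_equal_moralis_single_trade_extremes_py := by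
  intro w ts _
  show moralis_single_trade_extremes_py w ts = moralis_single_trade_extremes_py_alt w ts
  rw [moralis_single_trade_extremes_py, moralis_single_trade_extremes_py_alt,
      pvA_eq w ts none none, pvSolve_eq, pvF_eq]
  simp [pvRunMax_eq]
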